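-- pv_equiv track=rewrite | github.com/Eghosa-Osayande/Mobile-Robot-Navigation-Obstacle-Avoidance | simulation/controllers/agent_controller/utils.py | generate_sub_moves
-- ===== SOURCE A (Python) =====
-- def generate_sub_moves(start, target):
--
--     current_position = list(start)
--     target_position = list(target)
--
--     moves = []
--
--     while current_position != target_position:
--         move = (0, 0)  # No movement initially
--
--         # Check horizontal movement
--         if current_position[0] < target_position[0]:
--             move = (1, 0)  # Move right
--         elif current_position[0] > target_position[0]:
--             move = (-1, 0)  # Move left
--
--         # Check vertical movement
--         if current_position[1] < target_position[1]:
--             move = (move[0], 1)  # Move up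
--         elif current_position[1] > target_position[1]:
--             move = (move[0], -1)  # Move down
--
--         current_position[0] += move[0]
--         current_position[1] += move[1]
--
--         moves.append(tuple(current_position))
--
--     return moves
-- ===== SOURCE B (Python) =====
-- def generate_sub_moves(start, target):
--     dx = target[0] - start[0]
--     dy = target[1] - start[1]
--     sx = (dx > 0) - (dx < 0)
--     sy = (dy > 0) - (dy < 0)
--     n = max(abs(dx), abs(dy))
--     return [(start[0] + sx * min(i, abs(dx)), start[1] + sy * min(i, abs(dy)))
--             for i in range(1, n + 1)]
-- ===== Notes on version B (the rewrite author's own statement) =====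
-- stated objective: alternative
-- what changed: Replaces the mutating while-loop over a running current_position with a closed-form comprehension computing each intermediate position directly from its step index via per-axis signs and min(i,|diff|).
import Mathlib
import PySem

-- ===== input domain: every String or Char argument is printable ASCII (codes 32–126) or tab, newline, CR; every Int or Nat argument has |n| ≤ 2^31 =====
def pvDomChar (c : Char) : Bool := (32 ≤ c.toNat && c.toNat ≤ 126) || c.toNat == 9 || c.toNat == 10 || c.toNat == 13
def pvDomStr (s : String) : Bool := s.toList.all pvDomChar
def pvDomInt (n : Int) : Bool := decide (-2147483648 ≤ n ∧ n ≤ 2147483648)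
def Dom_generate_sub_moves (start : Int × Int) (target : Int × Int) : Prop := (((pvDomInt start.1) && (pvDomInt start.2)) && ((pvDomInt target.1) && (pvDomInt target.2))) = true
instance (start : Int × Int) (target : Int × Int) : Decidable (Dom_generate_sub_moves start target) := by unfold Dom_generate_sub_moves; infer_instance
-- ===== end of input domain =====

-- B replaces A's mutating while-loop with a closed-form comprehension indexed by the step number; alternative decomposition, same cost.

-- ===== PORT A =====
-- the while-loop of A: step one move toward the target, append the new position.
-- fuel = max |dx| |dy| is exactly the number of iterations A's loop performs; it only makes the recursion structural.
def gsmGo (fuel : Nat) (c : Int × Int) (t : Int × Int) : List (Int × Int) :=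
  match fuel with
  | 0 => []
  | fuel + 1 =>
    if c = t then []
    else
      let m1 : Int := if c.1 < t.1 then 1 else if t.1 < c.1 then -1 else 0
      let m2 : Int := if c.2 < t.2 then 1 else if t.2 < c.2 then -1 else 0
      let c' : Int × Int := (c.1 + m1, c.2 + m2)
      c' :: gsmGo fuel c' t

def generate_sub_moves (start : Int × Int) (target : Int × Int) : List (Int × Int) :=
  gsmGo (max (target.1 - start.1).natAbs (target.2 - start.2).natAbs) start target

-- ===== PORT B =====
def generate_sub_moves_alt (start : Int × Int) (target : Int × Int) : List (Int × Int) :=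
  let dx := target.1 - start.1
  let dy := target.2 - start.2
  let sx : Int := (if 0 < dx then 1 else 0) - (if dx < 0 then 1 else 0)
  let sy : Int := (if 0 < dy then 1 else 0) - (if dy < 0 then 1 else 0)
  let n := max dx.natAbs dy.natAbs
  (List.range n).map (fun (i : Nat) =>
    (start.1 + sx * min ((i : Int) + 1) (dx.natAbs : Int),
     start.2 + sy * min ((i : Int) + 1) (dy.natAbs : Int)))

-- ===== PRECONDITION & SPEC =====
def Spec_generate_sub_moves (start : Int × Int) (target : Int × Int) (out : List (Int × Int)) : Prop := out = generate_sub_moves_alt start target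
instance (start : Int × Int) (target : Int × Int) (out : List (Int × Int)) : Decidable (Spec_generate_sub_moves start target out) := by unfold Spec_generate_sub_moves; infer_instance

-- ===== CLAIM (what is proved, stated in full; the proofs are below) =====
def Claim_equal_generate_sub_moves : Prop := ∀ (start : Int × Int) (target : Int × Int), Dom_generate_sub_moves start target → Spec_generate_sub_moves start target (generate_sub_moves start target)

-- ===== LEMMAS AND PROOFS =====

-- sign as B computes it
def pvSgn (d : Int) : Int := (if 0 < d then 1 else 0) - (if d < 0 then 1 else 0)

lemma gsmGo_closed (n : Nat) :
    ∀ (c t : Int × Int), max (t.1 - c.1).natAbs (t.2 - c.2).natAbs = n →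
    gsmGo n c t = (List.range n).map (fun (i : Nat) =>
      (c.1 + pvSgn (t.1 - c.1) * min ((i : Int) + 1) ((t.1 - c.1).natAbs : Int),
       c.2 + pvSgn (t.2 - c.2) * min ((i : Int) + 1) ((t.2 - c.2).natAbs : Int))) := by
  induction n with
  | zero => intro c t _; simp [gsmGo]
  | succ n ih =>
    intro c t hn
    have hne : ¬ c = t := by
      intro hc; subst hc; simp at hn
    rw [gsmGo, if_neg hne]
    set m1 : Int := if c.1 < t.1 then 1 else if t.1 < c.1 then -1 else 0 with hm1
    set m2 : Int := if c.2 < t.2 then 1 else if t.2 < c.2 then -1 else 0 with hm2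
    have hm1' : m1 = pvSgn (t.1 - c.1) := by
      simp only [hm1, pvSgn]; split_ifs <;> omega
    have hm2' : m2 = pvSgn (t.2 - c.2) := by
      simp only [hm2, pvSgn]; split_ifs <;> omega
    have hmeas : max (t.1 - (c.1 + m1)).natAbs (t.2 - (c.2 + m2)).natAbs = n := by
      simp only [hm1, hm2]; split_ifs <;> omega
    have htail := ih (c.1 + m1, c.2 + m2) t hmeas
    show ((c.1 + m1, c.2 + m2) : Int × Int) :: gsmGo n (c.1 + m1, c.2 + m2) t = _
    rw [htail, List.range_succ_eq_map, List.map_cons, List.map_map]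
    congr 1
    · -- head: the first generated position equals the closed form at index 0
      have e1 : c.1 + m1 = c.1 + pvSgn (t.1 - c.1) * min ((0 : Int) + 1) ((t.1 - c.1).natAbs : Int) := by
        rw [hm1'] ; unfold pvSgn ; split_ifs <;> omega
      have e2 : c.2 + m2 = c.2 + pvSgn (t.2 - c.2) * min ((0 : Int) + 1) ((t.2 - c.2).natAbs : Int) := by
        rw [hm2'] ; unfold pvSgn ; split_ifs <;> omega
      simp only [Nat.cast_zero]
      exact Prod.ext e1 e2
    · -- tail: shift of index
      apply List.map_congr_left
      intro i _
      have e1 : (c.1 + m1) + pvSgn (t.1 - (c.1 + m1)) * min ((i : Int) + 1) ((t.1 - (c.1 + m1)).natAbs : Int)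
          = c.1 + pvSgn (t.1 - c.1) * min (((i : Int) + 1) + 1) ((t.1 - c.1).natAbs : Int) := by
        rw [hm1'] ; unfold pvSgn ; split_ifs <;> omega
      have e2 : (c.2 + m2) + pvSgn (t.2 - (c.2 + m2)) * min ((i : Int) + 1) ((t.2 - (c.2 + m2)).natAbs : Int)
          = c.2 + pvSgn (t.2 - c.2) * min (((i : Int) + 1) + 1) ((t.2 - c.2).natAbs : Int) := by
        rw [hm2'] ; unfold pvSgn ; split_ifs <;> omega
      simp only [Function.comp]
      exact Prod.ext e1 e2

-- ===== VERDICT (by name: the statement is the Claim_ definition above) =====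
theorem generate_sub_moves_spec : Claim_equal_generate_sub_moves := by
  intro start target _
  unfold Spec_generate_sub_moves generate_sub_moves generate_sub_moves_alt
  simpa [pvSgn] using gsmGo_closed _ start target rfl
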